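-- pv_equiv track=rewrite | github.com/DigitalMith/orion-release | user_data/orion_cli/commands/config.py | _is_under_wildcard
-- ===== SOURCE A (Python) =====
-- from typing import Any, Dict, Iterable, Optional, Set, Tuple
--
-- def _is_under_wildcard(prefix: str, wildcard_prefixes: Set[str]) -> bool:
--     if not prefix:
--         return False
--     parts = prefix.split(".")
--     for i in range(1, len(parts) + 1):
--         if ".".join(parts[:i]) in wildcard_prefixes:
--             return True
--     return False
-- ===== SOURCE B (Python) =====
-- def _is_under_wildcard(prefix: str, wildcard_prefixes) -> bool:
--     if not prefix:
--         return False
--     for w in wildcard_prefixes: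
--         if w == prefix or prefix.startswith(w + "."):
--             return True
--     return False
-- ===== Notes on version B (the rewrite author's own statement) =====
-- stated objective: alternative
-- what changed: B never enumerates or builds dotted prefixes of the input at all: it iterates over the wildcard set and tests each entry w directly against the prefix with w == prefix or prefix.startswith(w + '.'), which is equivalent because a dotted prefix of the string is exactly a wildcard entry that equals it or is followed by a dot.
import Mathlib
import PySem

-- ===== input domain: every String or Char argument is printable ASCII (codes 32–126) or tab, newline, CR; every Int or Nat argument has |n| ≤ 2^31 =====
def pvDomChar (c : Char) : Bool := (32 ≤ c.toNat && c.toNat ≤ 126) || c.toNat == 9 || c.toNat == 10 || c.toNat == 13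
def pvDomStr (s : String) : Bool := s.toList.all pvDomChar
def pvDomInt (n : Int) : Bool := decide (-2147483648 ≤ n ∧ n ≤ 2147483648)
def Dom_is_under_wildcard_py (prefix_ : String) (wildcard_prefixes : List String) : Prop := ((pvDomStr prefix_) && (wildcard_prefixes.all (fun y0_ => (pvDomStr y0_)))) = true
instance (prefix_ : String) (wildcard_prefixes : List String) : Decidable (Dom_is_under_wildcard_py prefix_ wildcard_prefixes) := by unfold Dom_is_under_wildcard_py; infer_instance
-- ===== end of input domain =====

-- B never builds any dotted prefix of the input: it scans the wildcard set and tests each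
-- entry w directly with w == prefix or prefix.startswith(w + "."); same result on every
-- input (alternative algorithm, no speed claim).

-- ===== PORT A =====
def is_under_wildcard_py (prefix_ : String) (wildcard_prefixes : List String) : Bool :=
  if prefix_.toList = [] then false
  else
    let parts := PySem.Chars.splitOn prefix_.toList ['.']
    (PySem.List.pyRange 1 (parts.length + 1) 1).any (fun i =>
      PySem.Set.contains wildcard_prefixes
        (String.ofList (PySem.Chars.join ['.'] (parts.take i.toNat))))

-- ===== PORT B =====
def is_under_wildcard_py_alt (prefix_ : String) (wildcard_prefixes : List String) : Bool :=
  if prefix_.toList = [] then false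
  else wildcard_prefixes.any (fun w =>
    w == prefix_ || PySem.Chars.startswith prefix_.toList (w.toList ++ ['.']))

-- ===== PRECONDITION & SPEC =====
def Spec_is_under_wildcard_py (prefix_ : String) (wildcard_prefixes : List String) (out : Bool) : Prop := out = is_under_wildcard_py_alt prefix_ wildcard_prefixes
instance (prefix_ : String) (wildcard_prefixes : List String) (out : Bool) : Decidable (Spec_is_under_wildcard_py prefix_ wildcard_prefixes out) := by unfold Spec_is_under_wildcard_py; infer_instance

-- ===== CLAIM (what is proved, stated in full; the proofs are below) =====
def Claim_equal_is_under_wildcard_py : Prop := ∀ (prefix_ : String) (wildcard_prefixes : List String), Dom_is_under_wildcard_py prefix_ wildcard_prefixes → Spec_is_under_wildcard_py prefix_ wildcard_prefixes (is_under_wildcard_py prefix_ wildcard_prefixes)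

-- ===== LEMMAS AND PROOFS =====

-- structural model of  s.split(".")
def dotSplit : List Char → List (List Char)
  | [] => [[]]
  | c :: t =>
    if c = '.' then [] :: dotSplit t
    else
      match dotSplit t with
      | [] => [[c]]
      | h :: r => (c :: h) :: r

def consHead (x : List Char) : List (List Char) → List (List Char)
  | [] => [x]
  | h :: r => (x ++ h) :: r

theorem dotSplit_ne_nil (cs : List Char) : dotSplit cs ≠ [] := by
  cases cs with
  | nil => simp [dotSplit]
  | cons c t =>
    simp only [dotSplit]
    split
    · simp
    · cases h : dotSplit t <;> simp

theorem consHead_nil_of_ne (ps : List (List Char)) (h : ps ≠ []) : consHead [] ps = ps := by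
  cases ps with
  | nil => exact absurd rfl h
  | cons a r => simp [consHead]

theorem splitOn_go_eq (l : List Char) : ∀ (fuel : Nat) (cur : List Char) (acc : List (List Char)),
    l.length ≤ fuel →
    PySem.Chars.splitOn.go ['.'] fuel l cur acc = acc.reverse ++ consHead cur.reverse (dotSplit l) := by
  induction l with
  | nil =>
    intro fuel cur acc _
    cases fuel <;> simp [PySem.Chars.splitOn.go, dotSplit, consHead]
  | cons c rest ih =>
    intro fuel cur acc hf
    cases fuel with
    | zero => simp at hf
    | succ f =>
      by_cases hc : c = '.'
      · subst hc
        have hpre : List.isPrefixOf ['.'] ('.' :: rest) = true := by simp [List.isPrefixOf]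
        simp only [PySem.Chars.splitOn.go, hpre, if_pos]
        have hdrop : List.drop ['.'].length ('.' :: rest) = rest := rfl
        rw [hdrop, ih f [] (cur.reverse :: acc) (by simpa using Nat.le_of_succ_le_succ hf)]
        simp only [dotSplit, consHead, List.reverse_cons]
        cases hds : dotSplit rest with
        | nil => exact absurd hds (dotSplit_ne_nil rest)
        | cons h r => simp
      · have hpre : List.isPrefixOf ['.'] (c :: rest) = false := by
          simp [List.isPrefixOf]; exact fun h => hc h.symm
        simp only [PySem.Chars.splitOn.go, hpre, Bool.false_eq_true, if_false]
        rw [ih f (c :: cur) acc (by simpa using Nat.le_of_succ_le_succ hf)]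
        cases hds : dotSplit rest with
        | nil => exact absurd hds (dotSplit_ne_nil rest)
        | cons h r => simp [dotSplit, hc, hds, consHead]

theorem splitOn_eq_dotSplit (cs : List Char) :
    PySem.Chars.splitOn cs ['.'] = dotSplit cs := by
  unfold PySem.Chars.splitOn
  rw [splitOn_go_eq cs (cs.length + 1) [] [] (by omega)]
  simp [consHead_nil_of_ne _ (dotSplit_ne_nil cs)]

theorem join_cons_ne (a : List Char) (l : List (List Char)) (h : l ≠ []) :
    PySem.Chars.join ['.'] (a :: l) = a ++ '.' :: PySem.Chars.join ['.'] l := by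
  cases l with
  | nil => exact absurd rfl h
  | cons b r => simp [PySem.Chars.join, List.intercalate, List.intersperse]

theorem join_single (a : List Char) : PySem.Chars.join ['.'] [a] = a := by
  simp [PySem.Chars.join, List.intercalate]

theorem take_ne_nil_of_pos {α : Type} (l : List α) (j : Nat) (hj : 1 ≤ j) (hl : l ≠ []) :
    l.take j ≠ [] := by
  cases l with
  | nil => exact absurd rfl hl
  | cons a t =>
    cases j with
    | zero => omega
    | succ n => simp

-- the candidates A enumerates are exactly: c = s, or c followed by a '.' is a prefix of s
theorem cand_char (s : List Char) : ∀ (c : List Char),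
    (∃ i, 1 ≤ i ∧ i ≤ (dotSplit s).length ∧ c = PySem.Chars.join ['.'] ((dotSplit s).take i))
    ↔ (c = s ∨ (c ++ ['.']) <+: s) := by
  induction s with
  | nil =>
    intro c
    constructor
    · rintro ⟨i, h1, h2, hc⟩
      simp only [dotSplit, List.length_cons, List.length_nil] at h2
      have hi : i = 1 := by omega
      subst hi
      left
      simpa [dotSplit, join_single] using hc
    · rintro (hc | hc)
      · exact ⟨1, le_refl _, by simp [dotSplit], by simp [hc, dotSplit]⟩
      · exfalso
        have := hc.length_le
        simp at this
  | cons x t ih =>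
    intro c
    by_cases hx : x = '.'
    · subst hx
      have hP : dotSplit t ≠ [] := dotSplit_ne_nil t
      have hdd : dotSplit ('.' :: t) = [] :: dotSplit t := by simp [dotSplit]
      constructor
      · rintro ⟨i, h1, h2, hc⟩
        rw [hdd] at h2 hc
        simp only [List.length_cons] at h2
        cases i with
        | zero => omega
        | succ j =>
          cases j with
          | zero =>
            -- i = 1 : the candidate is the empty string
            rw [List.take_succ_cons, List.take_zero, join_single] at hc
            subst hc
            exact Or.inr ⟨t, rfl⟩
          | succ k =>
            -- i ≥ 2 : the candidate is '.' :: (a candidate of t)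
            rw [List.take_succ_cons,
              join_cons_ne _ _ (take_ne_nil_of_pos _ _ (by omega) hP),
              List.nil_append] at hc
            rcases (ih (PySem.Chars.join ['.'] ((dotSplit t).take (k+1)))).mp
                ⟨k+1, by omega, by omega, rfl⟩ with h | ⟨r, hr⟩
            · left; rw [hc, h]
            · right
              refine ⟨r, ?_⟩
              rw [hc]
              simp only [List.cons_append, List.append_assoc] at hr ⊢
              rw [hr]
      · rintro (hc | ⟨r, hr⟩)
        · -- c = '.' :: t
          subst hc
          rcases (ih t).mpr (Or.inl rfl) with ⟨j, hj1, hj2, hjc⟩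
          refine ⟨j + 1, by omega, ?_, ?_⟩
          · rw [hdd]; simp only [List.length_cons]; omega
          · rw [hdd, List.take_succ_cons,
              join_cons_ne _ _ (take_ne_nil_of_pos _ _ hj1 hP),
              List.nil_append, ← hjc]
        · -- c ++ ['.'] is a prefix of '.' :: t
          cases c with
          | nil =>
            exact ⟨1, le_refl _, by rw [hdd]; simp,
              by rw [hdd]; simp⟩
          | cons y c' =>
            simp only [List.cons_append] at hr
            injection hr with hy1 hy2
            subst hy1
            rcases (ih c').mpr (Or.inr ⟨r, hy2⟩) with ⟨j, hj1, hj2, hjc⟩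
            refine ⟨j + 1, by omega, ?_, ?_⟩
            · rw [hdd]; simp only [List.length_cons]; omega
            · rw [hdd, List.take_succ_cons,
                join_cons_ne _ _ (take_ne_nil_of_pos _ _ hj1 hP),
                List.nil_append, ← hjc]
    · -- x ≠ '.'
      cases hds : dotSplit t with
      | nil => exact absurd hds (dotSplit_ne_nil t)
      | cons h r =>
        have hsplit : dotSplit (x :: t) = (x :: h) :: r := by
          simp [dotSplit, hx, hds]
        have hjoin : ∀ i, 1 ≤ i → i ≤ r.length + 1 →
            PySem.Chars.join ['.'] (((x :: h) :: r).take i)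
              = x :: PySem.Chars.join ['.'] ((h :: r).take i) := by
          intro i h1 h2
          cases i with
          | zero => omega
          | succ j =>
            cases j with
            | zero => simp
            | succ k =>
              have hr : r ≠ [] := by
                intro hnil; subst hnil; simp at h2
              rw [List.take_succ_cons, List.take_succ_cons,
                join_cons_ne _ _ (take_ne_nil_of_pos _ _ (by omega) hr),
                join_cons_ne _ _ (take_ne_nil_of_pos _ _ (by omega) hr)]
              simp
        constructor
        · rintro ⟨i, h1, h2, hc⟩
          rw [hsplit] at h2 hc
          simp only [List.length_cons] at h2
          rw [hjoin i h1 h2] at hc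
          have hrec := (ih (PySem.Chars.join ['.'] ((h :: r).take i))).mp
            ⟨i, h1, by rw [hds]; simpa using h2, by rw [hds]⟩
          rcases hrec with heq | ⟨q, hq⟩
          · left; rw [hc, heq]
          · right
            refine ⟨q, ?_⟩
            rw [hc]
            simp only [List.cons_append, List.append_assoc] at hq ⊢
            rw [hq]
        · rintro (hc | ⟨q, hq⟩)
          · subst hc
            rcases (ih t).mpr (Or.inl rfl) with ⟨j, hj1, hj2, hjc⟩
            rw [hds] at hj2 hjc
            simp only [List.length_cons] at hj2
            refine ⟨j, hj1, ?_, ?_⟩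
            · rw [hsplit]; simp only [List.length_cons]; omega
            · rw [hsplit, hjoin j hj1 (by omega), ← hjc]
          · cases c with
            | nil =>
              exfalso
              simp only [List.nil_append] at hq
              injection hq with hy1 _
              exact hx hy1.symm
            | cons y c' =>
              simp only [List.cons_append] at hq
              injection hq with hy1 hy2
              subst hy1
              rcases (ih c').mpr (Or.inr ⟨q, hy2⟩) with ⟨j, hj1, hj2, hjc⟩
              rw [hds] at hj2 hjc
              simp only [List.length_cons] at hj2
              refine ⟨j, hj1, ?_, ?_⟩
              · rw [hsplit]; simp only [List.length_cons]; omega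
              · rw [hsplit, hjoin j hj1 (by omega), ← hjc]

theorem pyRange_one (n : Nat) :
    PySem.List.pyRange 1 ((n : Int) + 1) 1 = List.map (fun k : Nat => 1 + (k : Int)) (List.range n) := by
  unfold PySem.List.pyRange
  rw [if_neg (by norm_num), if_pos (by norm_num)]
  have hcount : (if (1:Int) < (n:Int) + 1 then (((n:Int) + 1 - 1 + 1 - 1) / 1).toNat else 0) = n := by
    split <;> omega
  rw [hcount]
  show List.map (fun k : Nat => 1 + 1 * (k:Int)) (List.range n) = _
  apply List.map_congr_left
  intro k _
  ring

theorem ofList_mem_iff (l : List Char) (w : String) :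
    (w = String.ofList l) ↔ w.toList = l := by
  constructor
  · rintro rfl; exact String.toList_ofList
  · intro h
    apply String.toList_injective
    rw [h, String.toList_ofList]

-- ===== VERDICT (by name: the statement is the Claim_ definition above) =====
theorem is_under_wildcard_py_spec : Claim_equal_is_under_wildcard_py := by
  intro prefix_ ws _
  unfold Spec_is_under_wildcard_py is_under_wildcard_py is_under_wildcard_py_alt
  by_cases hnil : prefix_.toList = []
  · simp [hnil]
  · simp only [hnil, if_false]
    rw [splitOn_eq_dotSplit]
    rw [pyRange_one (dotSplit prefix_.toList).length, List.any_map]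
    rw [Bool.eq_iff_iff]
    simp only [List.any_eq_true, List.mem_range, Function.comp,
      PySem.Set.contains_iff, Bool.or_eq_true, beq_iff_eq,
      PySem.Chars.startswith_iff]
    constructor
    · rintro ⟨k, hk, hmem⟩
      have hkt : ((1 : Int) + (k : Int)).toNat = k + 1 := by omega
      rw [hkt] at hmem
      have hc := (cand_char prefix_.toList
          (PySem.Chars.join ['.'] ((dotSplit prefix_.toList).take (k+1)))).mp
        ⟨k + 1, by omega, by omega, rfl⟩
      refine ⟨_, hmem, ?_⟩
      rcases hc with h | h
      · left
        apply String.toList_injective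
        rw [String.toList_ofList, h]
      · right
        rw [String.toList_ofList]
        exact h
    · rintro ⟨w, hw, hcase⟩
      have hc : w.toList = prefix_.toList ∨ (w.toList ++ ['.']) <+: prefix_.toList := by
        rcases hcase with h | h
        · left; rw [h]
        · right; exact h
      rcases (cand_char prefix_.toList w.toList).mpr hc with ⟨i, hi1, hi2, hic⟩
      refine ⟨i - 1, by omega, ?_⟩
      have hkt : ((1 : Int) + ((i - 1 : Nat) : Int)).toNat = i := by omega
      rw [hkt]
      have hwof : String.ofList (PySem.Chars.join ['.'] ((dotSplit prefix_.toList).take i)) = w := by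
        symm
        exact (ofList_mem_iff _ w).mpr hic
      rw [hwof]
      exact hw
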